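-- pv_equiv track=rewrite | github.com/Etn40ff/affine_dominance | software/domination5.py | prefix_start_index
-- ===== SOURCE A (Python) =====
-- def prefix_start_index(c,v):
--     if v==[]:
--         return 0
--     elif v[0]==c[0]:
--         return prefix_start_index(c[1:]+[c[0]],v[1:])+1
--     else:
--         p=prefix_start_index(c[1:],v)
--         return p//(len(c)-1)*len(c)+p%(len(c)-1)
-- ===== SOURCE B (Python) =====
-- def prefix_start_index(c, v):
--     # Iterative two-phase version: simulate the scan with a growing list and a
--     # start offset (no per-step slicing), recording one step per event; then
--     # replay the recorded steps backwards to compose the index transforms.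
--     d = list(c)
--     start = 0
--     steps = []  # 0 = match; n >= 1 = skip when the current list had length n
--     for x in v:
--         while d[start] != x:
--             steps.append(len(d) - start)
--             start += 1
--         steps.append(0)
--         d.append(d[start])
--         start += 1
--     p = 0
--     for n in reversed(steps):
--         if n == 0:
--             p += 1
--         else:
--             p = p // (n - 1) * n + p % (n - 1)
--     return p
-- ===== Notes on version B (the rewrite author's own statement) =====
-- stated objective: faster
-- what changed: Replaces the slicing recursion by an iterative two-phase scan: a growing list with a start offset simulates the rotate/shrink in O(1) amortized per event while recording one step per event, then the index transforms are replayed backwards over the recorded steps; no list slicing or recursion remains.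
import Mathlib
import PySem

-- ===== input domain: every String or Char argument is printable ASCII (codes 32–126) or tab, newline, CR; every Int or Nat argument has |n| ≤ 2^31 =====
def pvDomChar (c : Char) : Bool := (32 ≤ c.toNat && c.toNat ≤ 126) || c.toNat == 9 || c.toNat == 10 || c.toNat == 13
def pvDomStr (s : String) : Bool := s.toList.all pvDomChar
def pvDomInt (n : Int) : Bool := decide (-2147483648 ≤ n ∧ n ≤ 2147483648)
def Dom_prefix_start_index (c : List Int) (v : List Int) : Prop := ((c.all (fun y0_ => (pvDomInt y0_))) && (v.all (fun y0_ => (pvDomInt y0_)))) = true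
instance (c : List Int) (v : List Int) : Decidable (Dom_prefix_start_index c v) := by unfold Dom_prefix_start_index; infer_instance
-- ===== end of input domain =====

-- B replaces A's slicing recursion by an iterative offset scan plus a backward
-- replay of recorded steps; objective: faster (no per-call slicing/recursion).

-- ===== PORT A =====
-- Literal transliteration of A.  Python raises IndexError when c is exhausted
-- while v is nonempty; that branch (excluded by Pre_) returns 0 here.
def prefix_start_index (c : List Int) (v : List Int) : Int :=
  match v, c with
  | [], _ => 0
  | _ :: _, [] => 0            -- Python: c[0] raises IndexError (outside Pre_)
  | a :: v', x :: c' =>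
      if a = x then
        prefix_start_index (c' ++ [x]) v' + 1
      else
        let p := prefix_start_index c' (a :: v')
        PySem.Int.floordiv p ((((x :: c').length : Int)) - 1) * ((x :: c').length : Int)
          + PySem.Int.mod p ((((x :: c').length : Int)) - 1)
  termination_by (v.length, c.length)
  decreasing_by
    · simp [Prod.lex_iff]
    · simp [Prod.lex_iff]

-- ===== PORT B =====
-- inner 'while d[start] != x' loop: returns recorded skip steps and the index
-- of the match (Python raises IndexError past the end; here we stop).
def pvSkip (d : List Int) (x : Int) (start : Nat) : List Int × Nat :=
  if h : start < d.length then
    if d[start] = x then ([], start)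
    else
      let r := pvSkip d x (start + 1)
      (((d.length - start : Nat) : Int) :: r.1, r.2)
  else ([], start)              -- Python: IndexError (outside Pre_)
  termination_by d.length - start

-- the 'for x in v' loop: record one step per event (0 = match, n ≥ 1 = skip)
def pvCollect (d : List Int) (start : Nat) (v : List Int) : List Int :=
  match v with
  | [] => []
  | x :: v' =>
      let r := pvSkip d x start
      if h : r.2 < d.length then
        r.1 ++ (0 :: pvCollect (d ++ [d[r.2]]) (r.2 + 1) v')
      else r.1                  -- Python: IndexError (outside Pre_)
  termination_by v.length

-- the backward replay 'for n in reversed(steps)'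
def pvStep (p : Int) (n : Int) : Int :=
  if n = 0 then p + 1
  else PySem.Int.floordiv p (n - 1) * n + PySem.Int.mod p (n - 1)

def prefix_start_index_alt (c : List Int) (v : List Int) : Int :=
  ((pvCollect c 0 v).reverse).foldl pvStep 0

-- ===== PRECONDITION & SPEC =====
-- Pre_ holds exactly when Python A returns normally: each element of v, in
-- turn, occurs in the current list, which then becomes the suffix after its
-- first occurrence with that element moved to the back; otherwise A raises
-- IndexError (and B raises too).
def pvOk (c : List Int) (v : List Int) : Bool :=
  match v with
  | [] => true
  | x :: v' =>
      if x ∈ c then pvOk (((c.dropWhile (fun y => y ≠ x)).tail) ++ [x]) v'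
      else false

def Pre_prefix_start_index (c : List Int) (v : List Int) : Prop := pvOk c v = true
instance (c : List Int) (v : List Int) : Decidable (Pre_prefix_start_index c v) := by
  unfold Pre_prefix_start_index; infer_instance

def pvWitness_prefix_start_index : List Int × List Int := ([1, 2], [1, 2])

def Spec_prefix_start_index (c : List Int) (v : List Int) (out : Int) : Prop := out = prefix_start_index_alt c v
instance (c : List Int) (v : List Int) (out : Int) : Decidable (Spec_prefix_start_index c v out) := by unfold Spec_prefix_start_index; infer_instance

-- ===== CLAIM (what is proved, stated in full; the proofs are below) =====
def Claim_equal_prefix_start_index : Prop := ∀ (c : List Int) (v : List Int), Dom_prefix_start_index c v → Pre_prefix_start_index c v → Spec_prefix_start_index c v (prefix_start_index c v)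

-- ===== LEMMAS AND PROOFS =====

def pvF (t : List Int) : Int := t.reverse.foldl pvStep 0

theorem pvF_cons (a : Int) (t : List Int) : pvF (a :: t) = pvStep (pvF t) a := by
  simp [pvF, List.foldl_append]

-- main invariant: A on the virtual list 'd.drop start' equals the replay of
-- the steps B records from state (d, start).
theorem pvMain (v d : List Int) (start : Nat) :
    prefix_start_index (d.drop start) v = pvF (pvCollect d start v) := by
  match v with
  | [] => simp [pvCollect, pvF, prefix_start_index]
  | x :: v' =>
    by_cases h : start < d.length
    · have hdrop : d.drop start = d[start] :: d.drop (start + 1) :=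
        (List.getElem_cons_drop h).symm
      by_cases hx : d[start] = x
      · -- match step
        have hskip : pvSkip d x start = ([], start) := by
          rw [pvSkip]; simp [h, hx]
        have hcol : pvCollect d start (x :: v') =
            0 :: pvCollect (d ++ [d[start]]) (start + 1) v' := by
          rw [pvCollect]; simp [hskip, h]
        have hIH := pvMain v' (d ++ [d[start]]) (start + 1)
        have hd2 : (d ++ [d[start]]).drop (start + 1) = d.drop (start + 1) ++ [d[start]] :=
          List.drop_append_of_le_length (by omega)
        rw [hcol, pvF_cons, ← hIH, hd2, hdrop]
        simp [prefix_start_index, hx, pvStep]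
      · -- skip step
        have hskip : pvSkip d x start =
            (((d.length - start : Nat) : Int) :: (pvSkip d x (start + 1)).1,
             (pvSkip d x (start + 1)).2) := by
          rw [pvSkip]; simp [h, hx]
        have hcol : pvCollect d start (x :: v') =
            ((d.length - start : Nat) : Int) :: pvCollect d (start + 1) (x :: v') := by
          rw [pvCollect, pvCollect, hskip]
          by_cases h2 : (pvSkip d x (start + 1)).2 < d.length <;> simp [h2]
        have hIH := pvMain (x :: v') d (start + 1)
        rw [hcol, pvF_cons, ← hIH, hdrop]
        have hlen : ((d[start] :: d.drop (start + 1)).length : Int)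
            = ((d.length - start : Nat) : Int) := by
          simp
        have hx' : ¬ (x = d[start]) := fun hh => hx hh.symm
        have h0 : ¬ (d.length - start = 0) := by omega
        rw [prefix_start_index]
        simp [pvStep, hx', h0]

    · have hdrop : d.drop start = [] := List.drop_eq_nil_of_le (by omega)
      have hskip : pvSkip d x start = ([], start) := by rw [pvSkip]; simp [h]
      have hcol : pvCollect d start (x :: v') = [] := by
        rw [pvCollect]; simp [hskip, h]
      rw [hdrop, hcol]; simp [prefix_start_index, pvF]
  termination_by (v.length, d.length - start)
  decreasing_by
    all_goals simp [Prod.lex_iff]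
    all_goals omega

-- ===== VERDICT (by name: the statement is the Claim_ definition above) =====
theorem prefix_start_index_spec : Claim_equal_prefix_start_index := by
  intro c v _ _
  unfold Spec_prefix_start_index prefix_start_index_alt
  have := pvMain v c 0
  simpa [pvF] using this
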